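-- pv_equiv track=rewrite | github.com/lposadamaths/A2223 | 3-1SPE-NSI/4-ACTIVITES/Denombrement.py | CRCount
-- ===== SOURCE A (Python) =====
-- def CRCount(N):
--     N =  int(N)
--     if(N <= 0): return 0
--
--     ex = len(str(N))
--     D  = int(10**(ex-1))
--     Q  = (N - D)+1
--     CR = int(Q*ex)
--     if ( Q > 0):
--         S = CRCount(N-Q)
--     else:
--         S= 0
--     CR += S
--     return CR
-- ===== SOURCE B (Python) =====
-- def CRCount(N):
--     N = int(N)
--     if N <= 0:
--         return 0
--     total = 0
--     low = 1
--     d = 1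
--     while low <= N:
--         total += (min(low * 10 - 1, N) - low + 1) * d
--         low *= 10
--         d += 1
--     return total
-- ===== Notes on version B (the rewrite author's own statement) =====
-- stated objective: alternative
-- what changed: Replaces A's top-down recursion, which rebuilds the decimal string of N and a power of ten at every level and peels off the highest digit-length group per call, with a single bottom-up while loop over digit-length buckets accumulating the count.
import Mathlib
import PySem

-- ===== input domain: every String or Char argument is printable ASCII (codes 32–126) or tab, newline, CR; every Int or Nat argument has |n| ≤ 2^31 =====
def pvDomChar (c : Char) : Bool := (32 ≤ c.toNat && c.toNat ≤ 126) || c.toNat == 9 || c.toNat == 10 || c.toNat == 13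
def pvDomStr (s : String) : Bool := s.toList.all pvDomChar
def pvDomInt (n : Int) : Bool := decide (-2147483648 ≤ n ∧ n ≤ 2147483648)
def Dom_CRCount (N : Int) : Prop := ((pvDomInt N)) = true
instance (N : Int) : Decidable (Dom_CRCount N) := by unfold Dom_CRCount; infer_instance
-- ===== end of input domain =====

-- B replaces A's top-down recursion over digit-length groups (which rebuilds str(N) and a
-- power of 10 at every level) with one bottom-up while loop over digit-length buckets (alternative decomposition,
-- same asymptotic cost; no string conversion per step).

-- ===== PORT A =====
-- 'N = int(N)' is the identity on Int. ex = len(str(N)) ≥ 1 for every int, so Python's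
-- 10**(ex-1) is exactly (10:Int)^(ex-1).toNat. The recursion decreases because the
-- branch taken has Q > 0.
def CRCount (N : Int) : Int :=
  if N ≤ 0 then 0
  else
    let ex : Int := PySem.Str.len (PySem.Int.toStr N)
    let D : Int := (10 : Int) ^ (ex - 1).toNat
    let Q : Int := (N - D) + 1
    let CR : Int := Q * ex
    let S : Int := if hq : 0 < Q then CRCount (N - Q) else 0
    CR + S
termination_by N.toNat
decreasing_by
  simp only [Q, D, ex] at hq
  omega

-- ===== PORT B =====
-- The while loop of Source B; the extra conjunct 1 ≤ low is a totality guard only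
-- (low starts at 1 and is only multiplied by 10, so 1 ≤ low holds on all reachable states).
def CRCountLoop (N low d total : Int) : Int :=
  if h : 1 ≤ low ∧ low ≤ N then
    CRCountLoop N (low * 10) (d + 1) (total + (min (low * 10 - 1) N - low + 1) * d)
  else total
termination_by (N + 1 - low).toNat
decreasing_by omega

def CRCount_alt (N : Int) : Int :=
  if N ≤ 0 then 0 else CRCountLoop N 1 1 0

-- ===== PRECONDITION & SPEC =====
def Spec_CRCount (N : Int) (out : Int) : Prop := out = CRCount_alt N
instance (N : Int) (out : Int) : Decidable (Spec_CRCount N out) := by unfold Spec_CRCount; infer_instance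

-- ===== CLAIM (what is proved, stated in full; the proofs are below) =====
def Claim_equal_CRCount : Prop := ∀ (N : Int), Dom_CRCount N → Spec_CRCount N (CRCount N)

-- ===== LEMMAS AND PROOFS =====

lemma loop_step (N low d total : Int) (h : 1 ≤ low ∧ low ≤ N) :
    CRCountLoop N low d total =
      CRCountLoop N (low * 10) (d + 1) (total + (min (low * 10 - 1) N - low + 1) * d) := by
  rw [CRCountLoop.eq_def, dif_pos h]

lemma loop_stop (N low d total : Int) (h : ¬(1 ≤ low ∧ low ≤ N)) :
    CRCountLoop N low d total = total := by
  rw [CRCountLoop.eq_def, dif_neg h]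

-- len(str(n)) for n ≥ 1 is log₁₀ n + 1 (Nat.toDigits is core's digit printer).
lemma toDigitsCore_len (f : Nat) : ∀ n : Nat, 0 < n → n < f →
    (Nat.toDigitsCore 10 f n []).length = Nat.log 10 n + 1 := by
  induction f with
  | zero => intro n h1 h2; omega
  | succ f ih =>
    intro n h1 h2
    simp only [Nat.toDigitsCore]
    by_cases hq : n / 10 = 0
    · have hlt : n < 10 := by omega
      simp [hq, Nat.log_eq_zero_iff.2 (Or.inl hlt)]
    · rw [if_neg hq, Nat.toDigitsCore_lens_eq]
      have hn10 : 10 ≤ n := by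
        by_contra hcon; push_neg at hcon
        exact hq (Nat.div_eq_of_lt hcon)
      have hdiv : n / 10 < n := Nat.div_lt_self h1 (by norm_num)
      rw [ih (n / 10) (by omega) (by omega)]
      have hlog : Nat.log 10 (n / 10) = Nat.log 10 n - 1 := Nat.log_div_base 10 n
      have hpos : 0 < Nat.log 10 n := Nat.log_pos (by norm_num) hn10
      omega

lemma len_toStr_pos (N : Int) (h : 0 < N) :
    PySem.Str.len (PySem.Int.toStr N) = (Nat.log 10 N.toNat : Int) + 1 := by
  rw [PySem.Str.len_eq, PySem.Int.toList_toStr]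
  unfold PySem.Int.toChars
  rw [if_neg (by omega)]
  unfold Nat.toDigits
  rw [toDigitsCore_len (N.toNat + 1) N.toNat (by omega) (by omega)]
  push_cast; ring

-- B's loop splits at the highest full power of 10: for 10^e ≤ N < 10^(e+1) and j + k = e,
-- the loop started at 10^j equals the same loop run with bound 10^e - 1 plus the top bucket.
lemma loop_split (e : Nat) (N : Int) (hN : (10 : Int) ^ e ≤ N) (hN2 : N < (10 : Int) ^ (e + 1)) :
    ∀ k, ∀ j d total, j + k = e →
      CRCountLoop N ((10 : Int) ^ j) d total =
        CRCountLoop ((10 : Int) ^ e - 1) ((10 : Int) ^ j) d total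
          + (N - (10 : Int) ^ e + 1) * (d + (k : Int)) := by
  intro k
  induction k with
  | zero =>
    intro j d total hj
    have hj' : e = j := by omega
    subst hj'
    have hD : (0 : Int) < 10 ^ e := pow_pos (by norm_num) _
    have h10 : (10 : Int) ^ e * 10 = 10 ^ (e + 1) := by ring
    rw [loop_step N _ _ _ ⟨by omega, hN⟩]
    rw [loop_stop N _ _ _ (by omega)]
    rw [loop_stop ((10 : Int) ^ e - 1) _ _ _ (by omega)]
    have hmin : min ((10 : Int) ^ e * 10 - 1) N = N := by omega
    rw [hmin]; push_cast; ring
  | succ k ih =>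
    intro j d total hj
    have hje : j < e := by omega
    have hDpos : (0 : Int) < 10 ^ j := pow_pos (by norm_num) _
    have hmono : (10 : Int) ^ (j + 1) ≤ 10 ^ e :=
      pow_le_pow_right₀ (by norm_num) (by omega)
    have h10 : (10 : Int) ^ j * 10 = 10 ^ (j + 1) := by ring
    rw [loop_step N _ _ _ ⟨by omega, by omega⟩]
    rw [loop_step ((10 : Int) ^ e - 1) _ _ _ ⟨by omega, by omega⟩]
    have hminN : min ((10 : Int) ^ j * 10 - 1) N = 10 ^ j * 10 - 1 := by omega
    have hminD : min ((10 : Int) ^ j * 10 - 1) ((10 : Int) ^ e - 1) = 10 ^ j * 10 - 1 := by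
      omega
    rw [hminN, hminD, h10]
    rw [ih (j + 1) (d + 1) _ (by omega)]
    push_cast; ring

lemma alt_eq_loop (M : Int) (h : 0 ≤ M) : CRCount_alt M = CRCountLoop M 1 1 0 := by
  unfold CRCount_alt
  by_cases hM : M ≤ 0
  · rw [if_pos hM, loop_stop M 1 1 0 (by omega)]
  · rw [if_neg hM]

lemma main_eq (n : Nat) : ∀ N : Int, N.toNat = n → CRCount N = CRCount_alt N := by
  induction n using Nat.strong_induction_on with
  | _ n ih =>
    intro N hn
    by_cases h0 : N ≤ 0
    · unfold CRCount CRCount_alt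
      rw [if_pos h0, if_pos h0]
    · push_neg at h0
      set e := Nat.log 10 N.toNat with he
      have hex := len_toStr_pos N h0
      have hDle : (10 : Int) ^ e ≤ N := by
        have h1 := Nat.pow_log_le_self 10 (x := N.toNat) (by omega)
        have h2 : ((10 : Nat) ^ e : Int) ≤ (N.toNat : Int) := by exact_mod_cast h1
        push_cast at h2; omega
      have hDgt : N < (10 : Int) ^ (e + 1) := by
        have h1 := Nat.lt_pow_succ_log_self (b := 10) (by norm_num) N.toNat
        have h2 : ((N.toNat : Int)) < ((10 : Nat) ^ (e + 1) : Int) := by exact_mod_cast h1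
        push_cast at h2; omega
      have hDpos : (0 : Int) < 10 ^ e := pow_pos (by norm_num) _
      -- evaluate one step of A
      unfold CRCount
      rw [if_neg (by omega)]
      rw [hex]
      dsimp only
      have hnat : (((Nat.log 10 N.toNat : Int)) + 1 - 1).toNat = e := by omega
      rw [hnat]
      rw [dif_pos (by omega : 0 < N - (10 : Int) ^ e + 1)]
      have hrec : N - (N - (10 : Int) ^ e + 1) = (10 : Int) ^ e - 1 := by ring
      rw [hrec]
      rw [ih ((10 : Int) ^ e - 1).toNat (by omega) _ rfl]
      -- evaluate B
      rw [alt_eq_loop N (by omega)]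
      have hsplit := loop_split e N hDle hDgt e 0 1 0 (by omega)
      simp only [pow_zero] at hsplit
      rw [hsplit, alt_eq_loop ((10 : Int) ^ e - 1) (by omega)]
      push_cast; ring

-- ===== VERDICT (by name: the statement is the Claim_ definition above) =====
theorem CRCount_spec : Claim_equal_CRCount := by
  intro N _
  unfold Spec_CRCount
  exact main_eq N.toNat N rfl
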